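-- pv_equiv track=rewrite | github.com/another-guy/Contests | 4a/4a_watermellon.py | answer
-- ===== SOURCE A (Python) =====
-- def answer(w):
--     for a in range(1, w):
--         b = w - a
--         if b <= 0:
--             continue
--         if a % 2 == 0 and b % 2 == 0:
--             return True
--     return False
-- ===== SOURCE B (Python) =====
-- def answer(w):
--     # closed form: two positive even summands exist iff w is even and w >= 4
--     return w % 2 == 0 and w > 2
-- ===== Notes on version B (the rewrite author's own statement) =====
-- stated objective: faster
-- what changed: Replaced the O(w) linear scan over all split points with the closed-form parity test 'w even and w > 2'.
import Mathlib
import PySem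

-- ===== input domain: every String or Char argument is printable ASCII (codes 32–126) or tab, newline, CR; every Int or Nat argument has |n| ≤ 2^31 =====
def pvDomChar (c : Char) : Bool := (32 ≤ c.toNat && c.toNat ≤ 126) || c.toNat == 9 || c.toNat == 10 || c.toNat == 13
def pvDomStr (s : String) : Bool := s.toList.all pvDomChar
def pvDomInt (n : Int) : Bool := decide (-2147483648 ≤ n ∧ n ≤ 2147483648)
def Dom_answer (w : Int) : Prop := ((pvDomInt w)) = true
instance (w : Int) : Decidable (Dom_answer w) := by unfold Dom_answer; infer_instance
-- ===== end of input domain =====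

-- B replaces A's linear scan by a closed-form parity test (objective: faster).

-- ===== PORT A =====
-- the for-loop with early return, as structural recursion over range(1, w)
def answerLoop (w : Int) : List Int → Bool
  | [] => false
  | a :: rest =>
    let b := w - a
    if b ≤ 0 then answerLoop w rest
    else if PySem.Int.mod a 2 = 0 ∧ PySem.Int.mod b 2 = 0 then true
    else answerLoop w rest

def answer (w : Int) : Bool := answerLoop w (PySem.List.pyRange 1 w 1)

-- ===== PORT B =====
def answer_alt (w : Int) : Bool := PySem.Int.mod w 2 = 0 ∧ w > 2

-- ===== PRECONDITION & SPEC =====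
def Spec_answer (w : Int) (out : Bool) : Prop := out = answer_alt w
instance (w : Int) (out : Bool) : Decidable (Spec_answer w out) := by unfold Spec_answer; infer_instance

-- ===== CLAIM (what is proved, stated in full; the proofs are below) =====
def Claim_equal_answer : Prop := ∀ (w : Int), Dom_answer w → Spec_answer w (answer w)

-- ===== LEMMAS AND PROOFS =====

theorem mod_two_emod (a : Int) : PySem.Int.mod a 2 = a % 2 :=
  PySem.Int.mod_eq_emod_of_pos (by norm_num)

-- the early-return loop is an existence test over the traversed list
theorem answerLoop_eq_any (w : Int) (l : List Int) :
    answerLoop w l =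
      l.any (fun a => decide (0 < w - a ∧ PySem.Int.mod a 2 = 0 ∧ PySem.Int.mod (w - a) 2 = 0)) := by
  induction l with
  | nil => rfl
  | cons a rest ih =>
    by_cases hb : w - a ≤ 0
    · have hpa : ¬ (0 < w - a ∧ PySem.Int.mod a 2 = 0 ∧ PySem.Int.mod (w - a) 2 = 0) :=
        fun hc => absurd hc.1 (by omega)
      simp only [answerLoop, if_pos hb, List.any_cons, decide_eq_false hpa, Bool.false_or, ih]
    · by_cases hp : PySem.Int.mod a 2 = 0 ∧ PySem.Int.mod (w - a) 2 = 0
      · have hc : 0 < w - a ∧ PySem.Int.mod a 2 = 0 ∧ PySem.Int.mod (w - a) 2 = 0 :=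
          ⟨by omega, hp.1, hp.2⟩
        simp only [answerLoop, if_neg hb, if_pos hp, List.any_cons, decide_eq_true hc,
          Bool.true_or]
      · have hc : ¬ (0 < w - a ∧ PySem.Int.mod a 2 = 0 ∧ PySem.Int.mod (w - a) 2 = 0) :=
          fun hc => hp hc.2
        simp only [answerLoop, if_neg hb, if_neg hp, List.any_cons, decide_eq_false hc,
          Bool.false_or, ih]

-- ===== VERDICT (by name: the statement is the Claim_ definition above) =====
theorem answer_spec : Claim_equal_answer := by
  intro w _
  unfold Spec_answer answer answer_alt
  rw [answerLoop_eq_any, Bool.eq_iff_iff]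
  simp only [List.any_eq_true, PySem.List.mem_pyRange_one, decide_eq_true_eq, mod_two_emod]
  constructor
  · rintro ⟨a, ⟨h1, h2⟩, h3, h4, h5⟩
    constructor <;> omega
  · rintro ⟨he, hw⟩
    exact ⟨2, ⟨by omega, by omega⟩, by omega, by omega, by omega⟩
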